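-- pv_equiv track=rewrite | github.com/JulianSchoenbaechler/stk-blender | io_antarctica_scene/stk_track_utils.py | order_drivelines
-- ===== SOURCE A (Python) =====
-- driveline_type = {
--     'driveline_main': 0x00,
--     'driveline_additional': 0x01,
--     'navmesh': 0x02,
-- }
--
-- def order_drivelines(drivelines: list):
--     ordered = []
--
--     # Move main driveline to position (index) 0
--     for d in drivelines:
--         if d[2] == driveline_type['driveline_main']:
--             ordered.insert(0, d)
--         else:
--             ordered.append(d)
--
--     return ordered
-- ===== SOURCE B (Python) =====
-- driveline_type = {
--     'driveline_main': 0x00,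
--     'driveline_additional': 0x01,
--     'navmesh': 0x02,
-- }
--
-- def order_drivelines(drivelines: list):
--     mains = []
--     others = []
--     for d in drivelines:
--         if d[2] == driveline_type['driveline_main']:
--             mains.append(d)
--         else:
--             others.append(d)
--     return mains[::-1] + others
-- ===== Notes on version B (the rewrite author's own statement) =====
-- stated objective: simpler
-- what changed: Replaces incremental insert(0)/append into one growing list by a single partition pass into two buckets, returning reversed mains concatenated with others.
import Mathlib
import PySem

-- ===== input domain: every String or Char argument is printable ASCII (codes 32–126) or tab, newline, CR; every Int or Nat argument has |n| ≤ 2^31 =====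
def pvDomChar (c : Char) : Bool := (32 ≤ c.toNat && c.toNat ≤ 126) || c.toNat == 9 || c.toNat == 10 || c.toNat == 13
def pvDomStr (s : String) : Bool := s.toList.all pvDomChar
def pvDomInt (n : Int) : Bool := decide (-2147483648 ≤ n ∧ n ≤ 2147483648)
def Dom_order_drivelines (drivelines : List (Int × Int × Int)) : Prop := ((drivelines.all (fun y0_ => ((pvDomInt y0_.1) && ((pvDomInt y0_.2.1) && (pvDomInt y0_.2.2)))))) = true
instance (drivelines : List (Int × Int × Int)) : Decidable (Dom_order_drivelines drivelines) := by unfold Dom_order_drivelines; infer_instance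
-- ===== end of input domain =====

-- B replaces A's incremental insert(0)/append into one list by a partition pass
-- into two buckets returning mains.reverse ++ others (objective: simpler).


-- ===== PORT A =====
-- for d in drivelines: insert at front if main, else append; state = ordered
def order_drivelines (drivelines : List (Int × Int × Int)) : List (Int × Int × Int) :=
  drivelines.foldl (fun ordered d =>
    if d.2.2 = 0 then d :: ordered else ordered ++ [d]) []

-- ===== PORT B =====
-- one pass appending into two buckets (mains, others), then mains[::-1] + others
def order_drivelines_alt (drivelines : List (Int × Int × Int)) : List (Int × Int × Int) :=
  let buckets := drivelines.foldl (fun (acc : List (Int × Int × Int) × List (Int × Int × Int)) d =>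
    if d.2.2 = 0 then (acc.1 ++ [d], acc.2) else (acc.1, acc.2 ++ [d])) ([], [])
  (PySem.List.slice? buckets.1 none none (-1)).getD [] ++ buckets.2

-- ===== PRECONDITION & SPEC =====
def Spec_order_drivelines (drivelines : List (Int × Int × Int)) (out : List (Int × Int × Int)) : Prop := out = order_drivelines_alt drivelines
instance (drivelines : List (Int × Int × Int)) (out : List (Int × Int × Int)) : Decidable (Spec_order_drivelines drivelines out) := by unfold Spec_order_drivelines; infer_instance

-- ===== CLAIM =====
def Claim_equal_order_drivelines : Prop := ∀ (drivelines : List (Int × Int × Int)), Dom_order_drivelines drivelines → Spec_order_drivelines drivelines (order_drivelines drivelines)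

-- ===== LEMMAS AND PROOFS =====

lemma order_drivelines_invariant (ds : List (Int × Int × Int))
    (m o : List (Int × Int × Int)) :
    ds.foldl (fun ordered d => if d.2.2 = 0 then d :: ordered else ordered ++ [d])
      (m.reverse ++ o)
    = (ds.foldl (fun (acc : List (Int × Int × Int) × List (Int × Int × Int)) d =>
        if d.2.2 = 0 then (acc.1 ++ [d], acc.2) else (acc.1, acc.2 ++ [d])) (m, o)).1.reverse
      ++ (ds.foldl (fun (acc : List (Int × Int × Int) × List (Int × Int × Int)) d =>
        if d.2.2 = 0 then (acc.1 ++ [d], acc.2) else (acc.1, acc.2 ++ [d])) (m, o)).2 := by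
  induction ds generalizing m o with
  | nil => simp
  | cons d ds ih =>
    simp only [List.foldl_cons]
    by_cases h : d.2.2 = 0
    · simpa [h] using ih (m ++ [d]) o
    · simpa [h] using ih m (o ++ [d])

-- ===== VERDICT =====
theorem order_drivelines_spec : Claim_equal_order_drivelines := by
  intro ds _
  unfold Spec_order_drivelines order_drivelines order_drivelines_alt
  have := order_drivelines_invariant ds [] []
  simp only [List.reverse_nil, List.nil_append] at this
  rw [this]
  simp [PySem.List.slice?_none_none_neg_one]
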